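-- pv_equiv track=rewrite | github.com/micdoh/vone_drl | heuristics.py | rank_v_nodes_lrc
-- ===== SOURCE A (Python) =====
-- def rank_v_nodes_lrc(node_request, bw_request, adjacency_list=((0, 1), (1, 2), (2, 0))):
--     """Calculate the Local Resource Capacity of a node.
--
--     Args:
--         graph: NetworkX graph.
--         node: Node to calculate LRC of.
--         bw_requests: Bandwidth requests of all virtual links.
--
--     Returns:
--         lrc: Local Resource Capacity of node.
--     """
--     rank = {}
--     for n, cap in enumerate(node_request):
--         rank[n] = [0, cap]
--         for bw, adj in zip(bw_request, adjacency_list):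
--             if n in adj:
--                 rank[n][0] += cap*bw
--     rank = [(lrc[0], node, lrc[1]) for node, lrc in rank.items()]
--     rank.sort(reverse=True)
--     return rank
-- ===== SOURCE B (Python) =====
-- def rank_v_nodes_lrc(node_request, bw_request, adjacency_list=((0, 1), (1, 2), (2, 0))):
--     # One pass over the edges accumulating bandwidth into per-endpoint totals,
--     # then one pass over the nodes multiplying by capacity; finally one sort.
--     totals = {}
--     for bw, adj in zip(bw_request, adjacency_list):
--         for n in set(adj):
--             totals[n] = totals.get(n, 0) + bw
--     rank = [(cap * totals.get(n, 0), n, cap) for n, cap in enumerate(node_request)]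
--     rank.sort(reverse=True)
--     return rank
-- ===== Notes on version B (the rewrite author's own statement) =====
-- stated objective: faster
-- what changed: Instead of scanning every edge once per node (membership test per node/edge pair), B folds over the edges once, adding each bandwidth to the totals of the edge's distinct endpoints in a dict, then builds (cap*total, node, cap) in one pass over the nodes and sorts.
import Mathlib
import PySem

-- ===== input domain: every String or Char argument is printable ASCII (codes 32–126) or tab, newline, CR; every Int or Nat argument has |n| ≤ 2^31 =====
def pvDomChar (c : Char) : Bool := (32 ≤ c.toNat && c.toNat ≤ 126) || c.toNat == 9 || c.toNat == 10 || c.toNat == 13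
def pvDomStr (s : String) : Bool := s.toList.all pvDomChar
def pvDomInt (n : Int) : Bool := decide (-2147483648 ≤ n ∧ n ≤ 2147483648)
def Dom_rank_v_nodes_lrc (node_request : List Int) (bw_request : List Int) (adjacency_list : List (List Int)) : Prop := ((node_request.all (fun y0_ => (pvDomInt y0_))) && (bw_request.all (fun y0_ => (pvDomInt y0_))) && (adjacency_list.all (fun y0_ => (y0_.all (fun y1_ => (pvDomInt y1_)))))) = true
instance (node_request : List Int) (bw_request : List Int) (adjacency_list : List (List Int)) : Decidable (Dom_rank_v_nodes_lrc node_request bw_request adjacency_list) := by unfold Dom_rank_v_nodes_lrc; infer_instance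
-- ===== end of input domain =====

-- B replaces A's per-node scan of all edges by one accumulation pass over the edges; equivalence proved on all inputs.
-- Both ports sort with the key (t.1, t.2.1): exact for Python's full-tuple sort here because the middle
-- components (the node indices) are pairwise distinct, so the third component is never compared.

-- ===== PORT A =====
def rank_v_nodes_lrc (node_request : List Int) (bw_request : List Int) (adjacency_list : List (List Int)) : List (Int × Int × Int) :=
  let rank : PySem.Dict Int (Int × Int) :=
    (PySem.List.enumerate node_request).foldl (fun d nc =>
      let d1 := d.insert nc.1 (0, nc.2)                  -- rank[n] = [0, cap]
      (bw_request.zip adjacency_list).foldl (fun d2 ba =>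
        if ba.2.contains nc.1 then                       -- if n in adj
          d2.modify nc.1 (0, 0) (fun v => (v.1 + nc.2 * ba.1, v.2))   -- rank[n][0] += cap*bw
        else d2) d1)
      PySem.Dict.empty
  let lst := rank.items.map (fun p => (p.2.1, p.1, p.2.2))
  PySem.List.sorted2 lst (fun t => t.1) (fun t => t.2.1) true   -- rank.sort(reverse=True)

-- ===== PORT B =====
def rank_v_nodes_lrc_alt (node_request : List Int) (bw_request : List Int) (adjacency_list : List (List Int)) : List (Int × Int × Int) :=
  let totals : PySem.Dict Int Int :=
    (bw_request.zip adjacency_list).foldl (fun d ba =>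
      (PySem.Set.ofList ba.2).foldl (fun d2 n => d2.insert n (d2.getD n 0 + ba.1)) d)   -- for n in set(adj): totals[n] = totals.get(n,0)+bw
      PySem.Dict.empty
  let rank := (PySem.List.enumerate node_request).map (fun nc => (nc.2 * totals.getD nc.1 0, nc.1, nc.2))
  PySem.List.sorted2 rank (fun t => t.1) (fun t => t.2.1) true  -- rank.sort(reverse=True)

-- ===== PRECONDITION & SPEC =====
def Spec_rank_v_nodes_lrc (node_request : List Int) (bw_request : List Int) (adjacency_list : List (List Int)) (out : List (Int × Int × Int)) : Prop := out = rank_v_nodes_lrc_alt node_request bw_request adjacency_list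
instance (node_request : List Int) (bw_request : List Int) (adjacency_list : List (List Int)) (out : List (Int × Int × Int)) : Decidable (Spec_rank_v_nodes_lrc node_request bw_request adjacency_list out) := by unfold Spec_rank_v_nodes_lrc; infer_instance

-- ===== CLAIM (what is proved, stated in full; the proofs are below) =====
def Claim_equal_rank_v_nodes_lrc : Prop := ∀ (node_request : List Int) (bw_request : List Int) (adjacency_list : List (List Int)), Dom_rank_v_nodes_lrc node_request bw_request adjacency_list → Spec_rank_v_nodes_lrc node_request bw_request adjacency_list (rank_v_nodes_lrc node_request bw_request adjacency_list)

-- ===== LEMMAS AND PROOFS =====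

-- total bandwidth of the edges incident to node n
def bwSum (edges : List (Int × List Int)) (n : Int) : Int :=
  (edges.map (fun ba => if ba.2.contains n then ba.1 else 0)).sum

theorem getD_foldl_insert_add_nodup (l : List Int) (d : PySem.Dict Int Int) (bw n : Int)
    (hl : l.Nodup) :
    (l.foldl (fun d2 m => d2.insert m (d2.getD m 0 + bw)) d).getD n 0
      = d.getD n 0 + if n ∈ l then bw else 0 := by
  induction l generalizing d with
  | nil => simp
  | cons m l ih =>
    simp only [List.foldl_cons]
    rw [ih _ (List.Nodup.of_cons hl)]
    by_cases hnm : n = m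
    · subst hnm
      have hnl : n ∉ l := (List.nodup_cons.mp hl).1
      simp [hnl, PySem.Dict.getD_insert_self]
    · simp [PySem.Dict.getD_insert, hnm]
theorem getD_totals (edges : List (Int × List Int)) (d : PySem.Dict Int Int) (n : Int) :
    (edges.foldl (fun d ba =>
        (PySem.Set.ofList ba.2).foldl (fun d2 m => d2.insert m (d2.getD m 0 + ba.1)) d) d).getD n 0
      = d.getD n 0 + bwSum edges n := by
  induction edges generalizing d with
  | nil => simp [bwSum]
  | cons ba edges ih =>
    simp only [List.foldl_cons]
    rw [ih, getD_foldl_insert_add_nodup _ _ _ _ (PySem.Set.nodup_ofList ba.2)]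
    have h : (n ∈ PySem.Set.ofList ba.2) ↔ ba.2.contains n = true := by
      rw [PySem.Set.mem_ofList]; simp
    simp only [bwSum, List.map_cons, List.sum_cons]
    by_cases hm : n ∈ PySem.Set.ofList ba.2
    · rw [if_pos hm, if_pos (h.mp hm)]; ring
    · rw [if_neg hm, if_neg (fun hx => hm (h.mpr hx))]; ring
theorem getD_innerA (edges : List (Int × List Int)) (d : PySem.Dict Int (Int × Int)) (n cap v : Int) :
    (edges.foldl (fun d2 ba =>
        if ba.2.contains n then d2.modify n (0, 0) (fun w => (w.1 + cap * ba.1, w.2)) else d2) d).getD v (0, 0)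
      = if v = n then ((d.getD n (0, 0)).1 + cap * bwSum edges n, (d.getD n (0, 0)).2)
        else d.getD v (0, 0) := by
  induction edges generalizing d with
  | nil =>
    by_cases hv : v = n
    · subst hv; simp [bwSum]
    · simp [hv]
  | cons ba edges ih =>
    simp only [List.foldl_cons]
    rw [ih]
    simp only [bwSum, List.map_cons, List.sum_cons]
    by_cases hc : ba.2.contains n = true
    · simp only [hc, if_true]
      by_cases hv : v = n
      · subst hv
        simp [PySem.Dict.getD_modify_self]
        ring
      · simp [hv, PySem.Dict.getD_modify]
    · simp only [hc, if_false, Bool.false_eq_true]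
      by_cases hv : v = n <;> simp [hv]
theorem keys_innerA (edges : List (Int × List Int)) (d : PySem.Dict Int (Int × Int)) (n cap : Int)
    (hc : d.contains n = true) :
    (edges.foldl (fun d2 ba =>
        if ba.2.contains n then d2.modify n (0, 0) (fun w => (w.1 + cap * ba.1, w.2)) else d2) d).keys
      = d.keys := by
  induction edges generalizing d with
  | nil => rfl
  | cons ba edges ih =>
    simp only [List.foldl_cons]
    by_cases hb : ba.2.contains n = true
    · simp only [hb, if_true]
      rw [ih _ (by simp [PySem.Dict.contains_modify, hc])]
      simp [PySem.Dict.keys_modify, PySem.Dict.keys_insert_of_contains, hc]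
    · simp only [hb, if_false, Bool.false_eq_true]
      exact ih _ hc
theorem items_outerA (edges : List (Int × List Int)) (nodes : List Int) (s : Int)
    (d : PySem.Dict Int (Int × Int)) (hnd : d.keys.Nodup) (hlt : ∀ k ∈ d.keys, k < s) :
    ((PySem.List.enumerate nodes s).foldl (fun d nc =>
        let d1 := d.insert nc.1 (0, nc.2)
        edges.foldl (fun d2 ba =>
          if ba.2.contains nc.1 then d2.modify nc.1 (0, 0) (fun w => (w.1 + nc.2 * ba.1, w.2)) else d2) d1) d).items
      = d.items ++ (PySem.List.enumerate nodes s).map (fun nc => (nc.1, (nc.2 * bwSum edges nc.1, nc.2))) := by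
  induction nodes generalizing s d with
  | nil => simp [PySem.List.enumerate_nil]
  | cons x nodes ih =>
    rw [PySem.List.enumerate_cons]
    simp only [List.foldl_cons, List.map_cons]
    have hsd : d.contains s = false := by
      rw [PySem.Dict.contains_eq_decide_mem_keys]
      simp only [decide_eq_false_iff_not]
      intro hmem; exact absurd (hlt s hmem) (lt_irrefl s)
    have hkeys1 : (d.insert s ((0 : Int), x)).keys = d.keys ++ [s] :=
      PySem.Dict.keys_insert_of_not_contains d _ hsd
    have hnd1 : (d.insert s ((0 : Int), x)).keys.Nodup := PySem.Dict.nodup_keys_insert _ _ _ hnd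
    have hk2 : (edges.foldl (fun d2 ba =>
        if ba.2.contains s then d2.modify s (0, 0) (fun w => (w.1 + x * ba.1, w.2)) else d2)
        (d.insert s ((0 : Int), x))).keys = d.keys ++ [s] := by
      rw [keys_innerA _ _ _ _ (PySem.Dict.contains_insert_self _ _ _), hkeys1]
    have hnd2 : (edges.foldl (fun d2 ba =>
        if ba.2.contains s then d2.modify s (0, 0) (fun w => (w.1 + x * ba.1, w.2)) else d2)
        (d.insert s ((0 : Int), x))).keys.Nodup := by
      rw [hk2, ← hkeys1]; exact hnd1
    have hit2 : (edges.foldl (fun d2 ba =>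
        if ba.2.contains s then d2.modify s (0, 0) (fun w => (w.1 + x * ba.1, w.2)) else d2)
        (d.insert s ((0 : Int), x))).items = d.items ++ [(s, (x * bwSum edges s, x))] := by
      rw [PySem.Dict.items_eq_map_keys _ hnd2 (0, 0), hk2, List.map_append]
      congr 1
      · rw [PySem.Dict.items_eq_map_keys d hnd (0, 0)]
        apply List.map_congr_left
        intro k hk
        have hks : k ≠ s := ne_of_lt (hlt k hk)
        rw [getD_innerA, if_neg hks, PySem.Dict.getD_insert, if_neg hks]
      · simp only [List.map_cons, List.map_nil]
        rw [getD_innerA, if_pos rfl, PySem.Dict.getD_insert_self]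
        norm_num
    rw [ih (s + 1) _ hnd2 (by
      rw [hk2]; intro k hk
      rcases List.mem_append.mp hk with h | h
      · exact lt_trans (hlt k h) (by omega)
      · simp at h; omega), hit2, List.append_assoc]
    rfl
-- ===== VERDICT (by name: the statement is the Claim_ definition above) =====
theorem rank_v_nodes_lrc_spec : Claim_equal_rank_v_nodes_lrc := by
  intro node_request bw_request adjacency_list _
  unfold Spec_rank_v_nodes_lrc rank_v_nodes_lrc rank_v_nodes_lrc_alt
  dsimp only
  rw [items_outerA (bw_request.zip adjacency_list) node_request 0 PySem.Dict.empty
      (by simp [PySem.Dict.keys_empty]) (by simp [PySem.Dict.keys_empty])]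
  have he : (PySem.Dict.empty : PySem.Dict Int (Int × Int)).items = [] := rfl
  rw [he, List.nil_append, List.map_map]
  congr 1
  apply List.map_congr_left
  intro nc _
  rw [getD_totals, PySem.Dict.getD_empty, zero_add]
  rfl
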